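-- pv_equiv track=rewrite | github.com/eastabrooka/AdventOfCode | AdventOfCodeDay5/src/Elf.py | AddSplitter
-- ===== SOURCE A (Python) =====
-- def AddSplitter(Line):
--     RollingBuffer = []
--
--     Temp = Line.split(" ")
--
--     RollingCounter = 0
--     for x in Temp:
--         if len(x) == 0:
--             RollingCounter+=1
--             if RollingCounter == 4:
--                 RollingCounter = 0
--                 RollingBuffer +=[" "]
--         else:
--             RollingCounter =0
--             RollingBuffer += [x]
--     return RollingBuffer
-- ===== SOURCE B (Python) =====
-- def AddSplitter(Line):
--     toks = Line.split(" ")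
--     out = []
--     i = 0
--     n = len(toks)
--     while i < n:
--         if toks[i] == "":
--             j = i
--             while j < n and toks[j] == "":
--                 j += 1
--             out += [" "] * ((j - i) // 4)
--             i = j
--         else:
--             out.append(toks[i])
--             i += 1
--     return out
-- ===== Notes on version B (the rewrite author's own statement) =====
-- stated objective: alternative
-- what changed: Replaces the per-token running counter (incremented, reset at 4 and on non-empty tokens) by run-length aggregation: each maximal run of k empty tokens is measured at once and contributes k//4 spaces.
import Mathlib
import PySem

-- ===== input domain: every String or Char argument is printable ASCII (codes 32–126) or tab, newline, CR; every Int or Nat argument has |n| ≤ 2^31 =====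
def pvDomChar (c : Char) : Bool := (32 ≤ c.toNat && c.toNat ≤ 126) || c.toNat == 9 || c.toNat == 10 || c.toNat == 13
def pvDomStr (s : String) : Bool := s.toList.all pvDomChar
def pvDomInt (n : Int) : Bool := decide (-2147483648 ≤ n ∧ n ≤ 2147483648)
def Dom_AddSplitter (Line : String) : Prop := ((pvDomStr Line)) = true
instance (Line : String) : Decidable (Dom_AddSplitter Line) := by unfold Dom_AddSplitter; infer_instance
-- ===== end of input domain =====

-- B replaces A's per-token running counter by run-length aggregation (each maximal
-- run of k empty tokens contributes k/4 spaces at once): an alternative decomposition, same cost.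


-- ===== PORT A =====
-- the for-loop over Temp with state (RollingCounter, RollingBuffer), transcribed as recursion
def aGo : List String → Int → List String → List String
  | [], _, buf => buf
  | x :: xs, c, buf =>
    if PySem.Str.len x = 0 then
      if c + 1 = 4 then aGo xs 0 (buf ++ [" "])
      else aGo xs (c + 1) buf
    else aGo xs 0 (buf ++ [x])

def AddSplitter (Line : String) : List String :=
  -- Line.split(" ") with a non-empty separator always returns a list (split? is some)
  aGo ((PySem.Str.split? Line " ").getD []) 0 []

-- ===== PORT B =====
-- Source B's outer while loop: on an empty token, measure the maximal empty run, emit (len/4) spaces,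
-- skip past it; on a non-empty token, append it and advance.
def bGo : List String → List String
  | [] => []
  | x :: xs =>
    if x = "" then
      List.replicate (((x :: xs).takeWhile (fun t => t = "")).length / 4) " "
        ++ bGo ((x :: xs).dropWhile (fun t => t = ""))
    else x :: bGo xs
  termination_by l => l.length
  decreasing_by
    · simp_all [List.dropWhile]
      exact List.length_dropWhile_le _ _
    · simp

def AddSplitter_alt (Line : String) : List String :=
  bGo ((PySem.Str.split? Line " ").getD [])

-- ===== PRECONDITION & SPEC =====
def Spec_AddSplitter (Line : String) (out : List String) : Prop := out = AddSplitter_alt Line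
instance (Line : String) (out : List String) : Decidable (Spec_AddSplitter Line out) := by unfold Spec_AddSplitter; infer_instance

-- ===== CLAIM (what is proved, stated in full; the proofs are below) =====
def Claim_equal_AddSplitter : Prop := ∀ (Line : String), Dom_AddSplitter Line → Spec_AddSplitter Line (AddSplitter Line)

-- ===== LEMMAS AND PROOFS =====

-- accumulator-free version of A's loop (proof helper, Nat counter)
def padGo : List String → Nat → List String
  | [], _ => []
  | x :: xs, c =>
    if x = "" then
      if c + 1 = 4 then " " :: padGo xs 0 else padGo xs (c + 1)
    else x :: padGo xs 0

lemma strLen_eq_zero_iff (x : String) : PySem.Str.len x = 0 ↔ x = "" := by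
  simp [PySem.Str.len_eq]

lemma aGo_eq_padGo (xs : List String) : ∀ (c : Int) (buf : List String),
    0 ≤ c → c < 4 → aGo xs c buf = buf ++ padGo xs c.toNat := by
  induction xs with
  | nil => intro c buf _ _; simp [aGo, padGo]
  | cons x xs ih =>
    intro c buf h0 h4
    by_cases hx : x = ""
    · have hlen : PySem.Str.len x = 0 := (strLen_eq_zero_iff x).mpr hx
      by_cases hc : c + 1 = 4
      · have : c.toNat + 1 = 4 := by omega
        simp [aGo, padGo, hx, hc, this, ih 0 _ (by norm_num) (by norm_num)]
      · have hc' : ¬ c.toNat + 1 = 4 := by omega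
        have h1 : (c + 1).toNat = c.toNat + 1 := by omega
        simp [aGo, padGo, hx, hc, hc', h1,
          ih (c + 1) buf (by omega) (by omega)]
    · have hlen : ¬ PySem.Str.len x = 0 := fun h => hx ((strLen_eq_zero_iff x).mp h)
      simp [aGo, padGo, hx, ih 0 _ (by norm_num) (by norm_num)]

-- starting at counter c < 4, a run of k empty tokens emits (c + k)/4 spaces and the
-- counter is 0 at the first non-empty token
lemma padGo_run (n : Nat) : ∀ xs : List String, xs.length ≤ n → ∀ c : Nat, c < 4 →
    padGo xs c = List.replicate ((c + (xs.takeWhile (fun t => t = "")).length) / 4) " "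
      ++ padGo (xs.dropWhile (fun t => t = "")) 0 := by
  induction n with
  | zero =>
    intro xs hl c hc
    have : xs = [] := List.eq_nil_of_length_eq_zero (by omega)
    subst this
    simp [padGo, Nat.div_eq_of_lt hc]
  | succ n ih =>
    intro xs hl c hc
    cases xs with
    | nil => simp [padGo, Nat.div_eq_of_lt hc]
    | cons x xs =>
      by_cases hx : x = ""
      · simp only [List.takeWhile_cons, List.dropWhile_cons, hx, decide_true,
          if_true, List.length_cons]
        by_cases hc4 : c + 1 = 4
        · have h4 : c = 3 := by omega
          rw [padGo]
          simp only [if_true, hc4]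
          rw [ih xs (by simpa using Nat.lt_succ_iff.mp (by simpa using hl)) 0 (by norm_num)]
          have : (c + ((List.takeWhile (fun t => t = "") xs).length + 1)) / 4
              = ((List.takeWhile (fun t => t = "") xs).length) / 4 + 1 := by
            omega
          rw [this]
          simp [List.replicate_succ]
        · rw [padGo]
          simp only [if_true, hc4, if_false]
          rw [ih xs (by simpa using Nat.lt_succ_iff.mp (by simpa using hl)) (c + 1) (by omega)]
          have : c + 1 + (List.takeWhile (fun t => t = "") xs).length
              = c + ((List.takeWhile (fun t => t = "") xs).length + 1) := by omega
          rw [this]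
      · simp only [List.takeWhile_cons, List.dropWhile_cons, hx, decide_false,
          Bool.false_eq_true, if_false, List.length_nil, Nat.add_zero,
          Nat.div_eq_of_lt hc, List.replicate_zero, List.nil_append]
        rw [padGo, padGo]
        simp [hx]

lemma padGo_zero_eq_bGo (n : Nat) : ∀ xs : List String, xs.length ≤ n →
    padGo xs 0 = bGo xs := by
  induction n with
  | zero =>
    intro xs hl
    have : xs = [] := List.eq_nil_of_length_eq_zero (by omega)
    subst this; simp [padGo, bGo]
  | succ n ih =>
    intro xs hl
    cases xs with
    | nil => simp [padGo, bGo]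
    | cons x xs =>
      by_cases hx : x = ""
      · subst hx
        rw [bGo, if_pos rfl]
        rw [padGo_run (xs.length + 1) ("" :: xs) (by simp) 0 (by norm_num)]
        simp only [Nat.zero_add]
        congr 1
        have hdrop : (("" :: xs).dropWhile (fun t => t = "")).length ≤ n := by
          have h1 : (("" :: xs).dropWhile (fun t => t = "")).length
              = (xs.dropWhile (fun t => t = "")).length := by
            simp
          have h2 := List.length_dropWhile_le (fun t => decide (t = "")) xs
          have h3 : xs.length ≤ n := by simpa using Nat.lt_succ_iff.mp (by simpa using hl)
          simp only [h1]
          exact le_trans (by simpa using h2) h3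
        exact ih _ hdrop
      · rw [bGo]
        simp only [hx, if_false]
        rw [padGo]
        simp only [hx, if_false]
        congr 1
        exact ih xs (by simpa using Nat.lt_succ_iff.mp (by simpa using hl))

-- ===== VERDICT (by name: the statement is the Claim_ definition above) =====
theorem AddSplitter_spec : Claim_equal_AddSplitter := by
  intro Line _
  unfold Spec_AddSplitter AddSplitter AddSplitter_alt
  rw [aGo_eq_padGo _ 0 [] (by norm_num) (by norm_num)]
  simp [padGo_zero_eq_bGo ((PySem.Str.split? Line " ").getD []).length _ (le_refl _)]
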